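-- pv_equiv track=rewrite | github.com/garigari-kun/til | src/codewars/python/5kyu/order_weight.py | order_weight
-- ===== SOURCE A (Python) =====
-- from collections import OrderedDict
--
-- def order_weight(strng):
--     if not strng:
--         return ''
--     weight_list = strng.split(' ')
--     ordered_weight_list = OrderedDict()
--     weight_rank_list = []
--     for index, weight in enumerate(weight_list):
--         num_list = [int(n) for n in weight]
--         ordered_weight_list[index] = sum(num_list)
--
--     ordered_weight_list = sorted(ordered_weight_list.items(), key=lambda t: t[1])
--
--     for key, value in ordered_weight_list:
--         weight_rank_list.append(str(weight_list[key]))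
--
--     return ' '.join(weight_rank_list)
-- ===== SOURCE B (Python) =====
-- def order_weight(strng):
--     if not strng:
--         return ''
--     toks = strng.split(' ')
--     pairs = [(t, sum(int(c) for c in t)) for t in toks]
--     out = []
--     for v in sorted(set(w for _, w in pairs)):
--         for t, w in pairs:
--             if w == v:
--                 out.append(t)
--     return ' '.join(out)
-- ===== Notes on version B (the rewrite author's own statement) =====
-- stated objective: alternative
-- what changed: B replaces A's stable comparison sort over all (index, weight) pairs by sorting only the distinct digit-sum weights and emitting, for each weight in increasing order, the tokens with that weight in input order.
import Mathlib
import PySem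

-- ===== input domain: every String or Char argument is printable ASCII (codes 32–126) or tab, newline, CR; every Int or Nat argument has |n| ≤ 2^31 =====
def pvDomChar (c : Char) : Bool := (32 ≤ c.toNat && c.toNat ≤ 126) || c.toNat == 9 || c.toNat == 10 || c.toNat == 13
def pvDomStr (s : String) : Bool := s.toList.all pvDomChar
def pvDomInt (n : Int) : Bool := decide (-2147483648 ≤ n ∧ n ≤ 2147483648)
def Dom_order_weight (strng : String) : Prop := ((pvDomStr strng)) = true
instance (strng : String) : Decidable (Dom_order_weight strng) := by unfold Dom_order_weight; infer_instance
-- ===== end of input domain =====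

-- B sorts only the distinct digit-sum weights and emits each weight's tokens in input order,
-- instead of A's stable comparison sort over all (index, weight) pairs; same return value (objective: alternative).

-- ===== PORT A =====
-- int(c) for a one-character string c (exact: none = ValueError, excluded by Pre_)
def pvCharInt (c : Char) : Int := (PySem.Int.ofStr? (String.ofList [c])).getD 0

-- sum([int(n) for n in weight])
def pvTokWeight (t : String) : Int := (t.toList.map pvCharInt).sum

def order_weight (strng : String) : String :=
  if strng = "" then ""
  else
    let weight_list := (PySem.Str.split? strng " ").getD []
    let ordered := (PySem.List.enumerate weight_list 0).foldl
        (fun (d : PySem.Dict Int Int) p => d.insert p.1 (pvTokWeight p.2)) PySem.Dict.empty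
    let sortedItems := PySem.List.sorted ordered.items (fun t => t.2) false
    let weight_rank_list := sortedItems.foldl
        (fun acc p => acc ++ [PySem.List.pyGetD weight_list p.1 ""]) []
    PySem.Str.join " " weight_rank_list

-- ===== PORT B =====
def order_weight_alt (strng : String) : String :=
  if strng = "" then ""
  else
    let toks := (PySem.Str.split? strng " ").getD []
    let pairs := toks.map (fun t => (t, pvTokWeight t))
    let keys := PySem.List.sorted (PySem.Set.ofList (pairs.map (fun p => p.2))) (fun x => x) false
    let out := keys.foldl
        (fun acc v => pairs.foldl (fun acc2 p => if p.2 == v then acc2 ++ [p.1] else acc2) acc) []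
    PySem.Str.join " " out

-- ===== PRECONDITION & SPEC =====
-- Pre_ excludes exactly the inputs where A raises ValueError: a character that is neither an
-- ASCII digit nor the separator space makes int(c) raise in A (B raises there too).
def Pre_order_weight (strng : String) : Prop :=
  (strng.toList.all (fun c => PySem.Chars.isdigit c || c == ' ')) = true
instance (strng : String) : Decidable (Pre_order_weight strng) := by unfold Pre_order_weight; infer_instance
def pvWitness_order_weight : String := "103 12 1"

def Spec_order_weight (strng : String) (out : String) : Prop := out = order_weight_alt strng
instance (strng : String) (out : String) : Decidable (Spec_order_weight strng out) := by unfold Spec_order_weight; infer_instance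

-- ===== CLAIM (what is proved, stated in full; the proofs are below) =====
def Claim_equal_order_weight : Prop := ∀ (strng : String), Dom_order_weight strng → Pre_order_weight strng → Spec_order_weight strng (order_weight strng)

-- ===== LEMMAS AND PROOFS =====

def pvLex (a b : Int × Int) : Prop := a.2 < b.2 ∨ (a.2 = b.2 ∧ a.1 < b.1)

theorem pvPairwise_insertBy (x : Int × Int) (acc : List (Int × Int))
    (h : acc.Pairwise pvLex) (hidx : ∀ a ∈ acc, a.1 < x.1) :
    (PySem.List.insertBy (fun a b => decide (a.2 < b.2)) x acc).Pairwise pvLex := by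
  induction acc with
  | nil => simp [PySem.List.insertBy, pvLex]
  | cons y ys ih =>
    rw [show PySem.List.insertBy (fun a b => decide (a.2 < b.2)) x (y :: ys) =
      if (decide (x.2 < y.2)) then x :: y :: ys else y :: PySem.List.insertBy (fun a b => decide (a.2 < b.2)) x ys from rfl]
    rcases List.pairwise_cons.mp h with ⟨hy, hys⟩
    by_cases hlt : x.2 < y.2
    · simp only [hlt, decide_true, if_true]
      refine List.pairwise_cons.mpr ⟨?_, h⟩
      intro b hb
      rcases List.mem_cons.mp hb with rfl | hb
      · exact Or.inl hlt
      · have := hy b hb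
        rcases this with h1 | ⟨h1, h2⟩
        · exact Or.inl (lt_trans hlt h1)
        · exact Or.inl (h1 ▸ hlt)
    · simp only [hlt, decide_false]
      refine List.pairwise_cons.mpr ⟨?_, ih hys (fun a ha => hidx a (List.mem_cons_of_mem _ ha))⟩
      intro b hb
      have hb' := (PySem.List.mem_insertBy _ _ _ _).mp hb
      rcases hb' with rfl | hb'
      · -- b = x ; y.2 ≤ x.2
        rcases lt_or_eq_of_le (not_lt.mp hlt) with h1 | h1
        · exact Or.inl h1
        · exact Or.inr ⟨h1, hidx y (List.mem_cons_self)⟩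
      · exact hy b hb'

theorem pvPairwise_sorted_foldl (L acc : List (Int × Int))
    (hacc : acc.Pairwise pvLex) (hcross : ∀ a ∈ acc, ∀ b ∈ L, a.1 < b.1)
    (hL : L.Pairwise (fun a b => a.1 < b.1)) :
    (L.foldl (fun acc x => PySem.List.insertBy (fun a b => decide (a.2 < b.2)) x acc) acc).Pairwise pvLex := by
  induction L generalizing acc with
  | nil => simpa using hacc
  | cons x L ih =>
    simp only [List.foldl_cons]
    rcases List.pairwise_cons.mp hL with ⟨hx, hL'⟩
    refine ih _ (pvPairwise_insertBy x acc hacc (fun a ha => hcross a ha x List.mem_cons_self)) ?_ hL'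
    intro a ha b hb
    rcases (PySem.List.mem_insertBy _ _ _ _).mp ha with rfl | ha
    · exact hx b hb
    · exact hcross a ha b (List.mem_cons_of_mem _ hb)

theorem pvSorted_pairwise_lex (L : List (Int × Int)) (hL : L.Pairwise (fun a b => a.1 < b.1)) :
    (PySem.List.sorted L (fun p => p.2) false).Pairwise pvLex := by
  rw [PySem.List.sorted_eq_foldl_insertBy]
  exact pvPairwise_sorted_foldl L [] (by simp) (by simp) hL

theorem pvFlatMap_filter_perm (ks : List Int) (L : List (Int × Int))
    (hnd : ks.Nodup) (hk : ∀ p ∈ L, p.2 ∈ ks) :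
    (ks.flatMap (fun v => L.filter (fun p => p.2 == v))).Perm L := by
  induction ks generalizing L with
  | nil =>
    have : L = [] := by
      cases L with
      | nil => rfl
      | cons p L => exact absurd (hk p List.mem_cons_self) (List.not_mem_nil)
    simp [this]
  | cons v ks ih =>
    rcases List.nodup_cons.mp hnd with ⟨hv, hnd'⟩
    simp only [List.flatMap_cons]
    have hrw : ∀ u ∈ ks, L.filter (fun p => p.2 == u) =
        (L.filter (fun p => !(p.2 == v))).filter (fun p => p.2 == u) := by
      intro u hu
      have huv : u ≠ v := fun hh => hv (hh ▸ hu)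
      rw [List.filter_filter]
      apply List.filter_congr
      intro p hp
      by_cases h : p.2 = u
      · simp [h, huv]
      · simp [h]
    have hfm : ks.flatMap (fun u => L.filter (fun p => p.2 == u)) =
        ks.flatMap (fun u => (L.filter (fun p => !(p.2 == v))).filter (fun p => p.2 == u)) := by
      clear ih hnd hnd' hv hk
      induction ks with
      | nil => rfl
      | cons u us ihu =>
        simp only [List.flatMap_cons]
        rw [hrw u List.mem_cons_self,
          ihu (fun w hw => hrw w (List.mem_cons_of_mem _ hw))]
    rw [hfm]
    have hsub : ∀ p ∈ L.filter (fun p => !(p.2 == v)), p.2 ∈ ks := by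
      intro p hp
      rcases List.mem_filter.mp hp with ⟨hpL, hpv⟩
      rcases List.mem_cons.mp (hk p hpL) with h1 | h1
      · simp [h1] at hpv
      · exact h1
    have hperm := ih (L.filter (fun p => !(p.2 == v))) hnd' hsub
    exact (List.Perm.append_left _ hperm).trans (List.filter_append_perm _ L)

theorem pvPairwise_flatMap_buckets (ks : List Int) (L : List (Int × Int))
    (hL : L.Pairwise (fun a b => a.1 < b.1)) (hks : ks.Pairwise (· < ·)) :
    (ks.flatMap (fun v => L.filter (fun p => p.2 == v))).Pairwise pvLex := by
  induction ks with
  | nil => simp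
  | cons v ks ih =>
    rcases List.pairwise_cons.mp hks with ⟨hv, hks'⟩
    simp only [List.flatMap_cons]
    rw [List.pairwise_append]
    refine ⟨?_, ih hks', ?_⟩
    · -- bucket v pairwise: filtered keeps idx order, all weights = v
      have h1 : (L.filter (fun p => p.2 == v)).Pairwise (fun a b => a.1 < b.1) := hL.filter _
      refine h1.imp_of_mem ?_
      intro a b ha hb hab
      have hav : a.2 = v := by simpa using (List.mem_filter.mp ha).2
      have hbv : b.2 = v := by simpa using (List.mem_filter.mp hb).2
      exact Or.inr ⟨hav.trans hbv.symm, hab⟩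
    · intro a ha b hb
      have hav : a.2 = v := by simpa using (List.mem_filter.mp ha).2
      rcases List.mem_flatMap.mp hb with ⟨u, hu, hbu⟩
      have hbv : b.2 = u := by simpa using (List.mem_filter.mp hbu).2
      exact Or.inl (by rw [hav, hbv]; exact hv u hu)

theorem pvStable_group (L : List (Int × Int)) (hL : L.Pairwise (fun a b => a.1 < b.1)) :
    PySem.List.sorted L (fun p => p.2) false =
      (PySem.List.sorted (PySem.Set.ofList (L.map (fun p => p.2))) (fun x => x) false).flatMap
        (fun v => L.filter (fun p => p.2 == v)) := by
  have hks : (PySem.List.sorted (PySem.Set.ofList (L.map (fun p => p.2))) (fun x => x) false).Pairwise (· < ·) :=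
    PySem.List.sorted_ofList_pairwise_lt _
  have hnd : (PySem.List.sorted (PySem.Set.ofList (L.map (fun p => p.2))) (fun x => x) false).Nodup :=
    hks.imp (fun h => ne_of_lt h)
  have hcov : ∀ p ∈ L, p.2 ∈ PySem.List.sorted (PySem.Set.ofList (L.map (fun p => p.2))) (fun x => x) false := by
    intro p hp
    rw [PySem.List.mem_sorted]
    exact (PySem.Set.mem_ofList _ _).mpr (List.mem_map_of_mem hp)
  have hperm : (PySem.List.sorted L (fun p => p.2) false).Perm
      ((PySem.List.sorted (PySem.Set.ofList (L.map (fun p => p.2))) (fun x => x) false).flatMap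
        (fun v => L.filter (fun p => p.2 == v))) :=
    (PySem.List.sorted_perm _ _ _).trans (pvFlatMap_filter_perm _ L hnd hcov).symm
  exact hperm.eq_of_pairwise
    (by
      intro a b _ _ h1 h2
      exfalso
      rcases h1 with h1 | ⟨e1, i1⟩ <;> rcases h2 with h2 | ⟨e2, i2⟩ <;> omega)
    (pvSorted_pairwise_lex L hL)
    (pvPairwise_flatMap_buckets _ L hL hks)

theorem pvEnum_filter_get (v : Int) (pre cur : List String) :
    ((PySem.List.enumerate cur (pre.length : Int)).filter (fun p => pvTokWeight p.2 == v)).map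
        (fun p => PySem.List.pyGetD (pre ++ cur) p.1 "") =
      cur.filter (fun t => pvTokWeight t == v) := by
  induction cur generalizing pre with
  | nil => simp [PySem.List.enumerate_nil]
  | cons t cur ih =>
    rw [PySem.List.enumerate_cons]
    have hsucc : ((pre.length : Int) + 1) = (((pre ++ [t]).length : Int)) := by simp
    have happ : pre ++ t :: cur = (pre ++ [t]) ++ cur := by simp
    have hget : PySem.List.pyGetD (pre ++ t :: cur) (pre.length : Int) "" = t := by
      rw [PySem.List.pyGetD_natCast]
      simp [List.getD]
    by_cases hv : pvTokWeight t == v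
    · simp only [List.filter_cons, hv, if_true, List.map_cons, hget]
      rw [hsucc, happ]
      exact congrArg (t :: ·) (ih (pre ++ [t]))
    · simp only [List.filter_cons, hv, if_false, Bool.false_eq_true]
      rw [hsucc, happ]
      exact ih (pre ++ [t])


theorem pv_main (strng : String) : order_weight strng = order_weight_alt strng := by
  by_cases h : strng = ""
  · simp [order_weight, order_weight_alt, h]
  · simp only [order_weight, order_weight_alt, if_neg h]
    set toks := (PySem.Str.split? strng " ").getD [] with htoks
    -- A's dict items
    have hitems : ((PySem.List.enumerate toks 0).foldl
        (fun (d : PySem.Dict Int Int) p => d.insert p.1 (pvTokWeight p.2)) PySem.Dict.empty).items =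
        (PySem.List.enumerate toks 0).map (fun p => (p.1, pvTokWeight p.2)) := by
      have := PySem.Dict.items_foldl_insert_fresh (PySem.List.enumerate toks 0)
        (fun p => p.1) (fun p => pvTokWeight p.2) (PySem.Dict.empty)
        (fun a _ => PySem.Dict.contains_empty _)
        ((List.pairwise_map.mpr (PySem.List.pairwise_lt_enumerate toks 0)).imp ne_of_lt)
      simpa using this
    rw [hitems]
    set E := (PySem.List.enumerate toks 0).map (fun p => (p.1, pvTokWeight p.2)) with hEdef
    have hE : E.Pairwise (fun a b => a.1 < b.1) := by
      rw [hEdef]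
      exact List.pairwise_map.mpr (PySem.List.pairwise_lt_enumerate toks 0)
    have hmap2 : E.map (fun p => p.2) = toks.map pvTokWeight := by
      rw [hEdef, List.map_map]
      have : ((fun p : Int × Int => p.2) ∘ fun p : Int × String => (p.1, pvTokWeight p.2)) =
          (fun p : Int × String => pvTokWeight p.2) := rfl
      rw [this, show (fun p : Int × String => pvTokWeight p.2) =
        (pvTokWeight ∘ fun p : Int × String => p.2) from rfl, ← List.map_map,
        PySem.List.map_snd_enumerate]
    -- B's pairs keys
    have hpairs2 : (toks.map (fun t => (t, pvTokWeight t))).map (fun p => p.2) = toks.map pvTokWeight := by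
      rw [List.map_map]; rfl
    rw [PySem.List.foldl_append_singleton_eq_map, List.nil_append]
    rw [pvStable_group E hE, hmap2]
    -- B's nested loop = flatMap of filters
    have hinner : (fun (acc : List String) (v : Int) =>
        (toks.map (fun t => (t, pvTokWeight t))).foldl
          (fun acc2 p => if p.2 == v then acc2 ++ [p.1] else acc2) acc) =
        (fun acc v => acc ++ ((toks.map (fun t => (t, pvTokWeight t))).filter (fun p => p.2 == v)).map (fun p => p.1)) := by
      funext acc v
      exact PySem.List.foldl_append_if _ _ _ _
    rw [hpairs2, hinner, PySem.List.foldl_append_eq_flatMap, List.nil_append]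
    rw [List.map_flatMap]
    congr 1
    refine congrArg (fun f => List.flatMap f _) (funext fun v => ?_)
    -- bucket equality: A's side
    have hA : (E.filter (fun p => p.2 == v)).map (fun p => PySem.List.pyGetD toks p.1 "") =
        toks.filter (fun t => pvTokWeight t == v) := by
      rw [hEdef, List.filter_map, List.map_map]
      have h0 : ((fun p : Int × Int => p.2 == v) ∘ fun p : Int × String => (p.1, pvTokWeight p.2)) =
          (fun p : Int × String => pvTokWeight p.2 == v) := rfl
      rw [h0]
      have := pvEnum_filter_get v [] toks
      simpa using this
    have hB : ((toks.map (fun t => (t, pvTokWeight t))).filter (fun p => p.2 == v)).map (fun p => p.1) =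
        toks.filter (fun t => pvTokWeight t == v) := by
      rw [List.filter_map, List.map_map]
      have h0 : ((fun p : String × Int => p.2 == v) ∘ fun t => (t, pvTokWeight t)) =
          (fun t => pvTokWeight t == v) := rfl
      rw [h0]
      have h1 : ((fun p : String × Int => p.1) ∘ fun t => (t, pvTokWeight t)) = id := rfl
      rw [h1, List.map_id]
    rw [hA, hB]

-- ===== VERDICT (by name: the statement is the Claim_ definition above) =====
theorem order_weight_spec : Claim_equal_order_weight := by
  intro strng _ _
  unfold Spec_order_weight
  exact pv_main strng
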